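-- pv_equiv track=rewrite | github.com/genomematt/survivalvolume | survivalvolume/parse.py | fixed_length_alternate_steps
-- ===== SOURCE A (Python) =====
-- def fixed_length_alternate_steps(start,length,step1,step2):
--     """Generate list of numbers that increments buy
--     steps of alternating magnitude eg [1,4,8,11,15]
--
--     Arguments:
--
--         start    -  value of first entry in list
--         length   -  length of list to be generated
--         step1    -  the magnitude of odd numbered steps
--         step2    -  the magnitude of even numbered steps
--
--     Returns:
--
--         a list of numeric values
--     """
--     result = []
--     x=start
--     result.append(x)
--     second_step = False
--     while len(result) < length:
--         if second_step:
--             x += step2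
--         else:
--             x += step1
--         result.append(x)
--         second_step = not second_step
--     return result
-- ===== SOURCE B (Python) =====
-- def fixed_length_alternate_steps(start, length, step1, step2):
--     """Closed form: entry i (i>=1) is start plus ceil(i/2) step1-increments
--     and floor(i/2) step2-increments; the first entry is always start."""
--     return [start] + [start + ((i + 1) // 2) * step1 + (i // 2) * step2
--                       for i in range(1, length)]
-- ===== Notes on version B (the rewrite author's own statement) =====
-- stated objective: alternative
-- what changed: Replaces the stateful while-loop accumulation (running value x plus a toggling second_step flag) with a closed-form comprehension computing each entry directly from its index as start + ceil(i/2)*step1 + floor(i/2)*step2.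
import Mathlib
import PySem

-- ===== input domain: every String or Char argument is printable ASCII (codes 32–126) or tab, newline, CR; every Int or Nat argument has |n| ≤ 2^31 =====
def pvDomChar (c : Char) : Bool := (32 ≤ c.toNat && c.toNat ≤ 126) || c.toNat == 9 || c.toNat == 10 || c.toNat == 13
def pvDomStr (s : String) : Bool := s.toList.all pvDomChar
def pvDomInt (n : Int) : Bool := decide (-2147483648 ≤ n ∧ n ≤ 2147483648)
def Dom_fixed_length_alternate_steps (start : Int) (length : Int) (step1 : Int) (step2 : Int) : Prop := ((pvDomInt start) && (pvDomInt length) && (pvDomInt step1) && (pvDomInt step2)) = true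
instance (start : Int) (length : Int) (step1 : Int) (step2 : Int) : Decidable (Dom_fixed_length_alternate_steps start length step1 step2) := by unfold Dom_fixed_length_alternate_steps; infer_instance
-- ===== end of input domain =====

-- B replaces A's stateful while-loop (running value + toggling flag) with a closed-form
-- per-index formula; alternative decomposition, same cost.


-- ===== PORT A =====
-- the 'while len(result) < length' loop; state = (x, result, second_step)
def pvLoopA (length step1 step2 : Int) (x : Int) (result : List Int) (second : Bool) : List Int :=
  if h : (result.length : Int) < length then
    let x' := if second then x + step2 else x + step1
    pvLoopA length step1 step2 x' (result ++ [x']) (!second)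
  else result
termination_by (length - result.length).toNat
decreasing_by simp; omega

def fixed_length_alternate_steps (start : Int) (length : Int) (step1 : Int) (step2 : Int) : List Int :=
  pvLoopA length step1 step2 start [start] false

-- ===== PORT B =====
def fixed_length_alternate_steps_alt (start : Int) (length : Int) (step1 : Int) (step2 : Int) : List Int :=
  [start] ++ (PySem.List.pyRange 1 length 1).map
    (fun i => start + PySem.Int.floordiv (i + 1) 2 * step1 + PySem.Int.floordiv i 2 * step2)

-- ===== PRECONDITION & SPEC =====
def Spec_fixed_length_alternate_steps (start : Int) (length : Int) (step1 : Int) (step2 : Int) (out : List Int) : Prop := out = fixed_length_alternate_steps_alt start length step1 step2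
instance (start : Int) (length : Int) (step1 : Int) (step2 : Int) (out : List Int) : Decidable (Spec_fixed_length_alternate_steps start length step1 step2 out) := by unfold Spec_fixed_length_alternate_steps; infer_instance

-- ===== CLAIM (what is proved, stated in full; the proofs are below) =====
def Claim_equal_fixed_length_alternate_steps : Prop := ∀ (start : Int) (length : Int) (step1 : Int) (step2 : Int), Dom_fixed_length_alternate_steps start length step1 step2 → Spec_fixed_length_alternate_steps start length step1 step2 (fixed_length_alternate_steps start length step1 step2)

-- ===== LEMMAS AND PROOFS =====

-- the sequence of values A's loop appends, as a pure generator on a fuel count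
def pvGen (step1 step2 : Int) (x : Int) (b : Bool) : Nat → List Int
  | 0 => []
  | n + 1 =>
      let x' := if b then x + step2 else x + step1
      x' :: pvGen step1 step2 x' (!b) n

lemma pvLoopA_eq_gen (length step1 step2 : Int) :
    ∀ (n : Nat) (x : Int) (res : List Int) (b : Bool),
      (length - res.length).toNat = n →
      pvLoopA length step1 step2 x res b = res ++ pvGen step1 step2 x b n := by
  intro n
  induction n with
  | zero =>
      intro x res b h
      rw [pvLoopA]
      have : ¬ ((res.length : Int) < length) := by omega
      simp [this, pvGen]
  | succ n ih =>
      intro x res b h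
      rw [pvLoopA]
      have hlt : (res.length : Int) < length := by omega
      have h' : (length - (res ++ [if b then x + step2 else x + step1]).length).toNat = n := by
        simp; omega
      simp only [hlt, dif_pos]
      rw [ih _ _ _ h']
      simp [pvGen]

-- B's closed form as a function of a Nat index
def pvF (start step1 step2 : Int) (k : Nat) : Int :=
  start + PySem.Int.floordiv ((k : Int) + 1) 2 * step1 + PySem.Int.floordiv (k : Int) 2 * step2

lemma pvF_succ (start step1 step2 : Int) (k : Nat) :
    pvF start step1 step2 (k + 1) =
      (if decide (k % 2 = 1) then pvF start step1 step2 k + step2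
       else pvF start step1 step2 k + step1) := by
  unfold pvF
  rw [PySem.Int.floordiv_eq_ediv_of_pos (a := (k : Int) + 1) (by omega),
      PySem.Int.floordiv_eq_ediv_of_pos (a := (k : Int)) (by omega),
      PySem.Int.floordiv_eq_ediv_of_pos (a := ((k + 1 : Nat) : Int) + 1) (by omega),
      PySem.Int.floordiv_eq_ediv_of_pos (a := ((k + 1 : Nat) : Int)) (by omega)]
  by_cases hk : k % 2 = 1
  · simp only [hk, decide_true, if_true]
    push_cast
    have h1 : ((k : Int) + 1 + 1) / 2 = ((k : Int) + 1) / 2 := by omega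
    have h2 : ((k : Int) + 1) / 2 = (k : Int) / 2 + 1 := by omega
    rw [h1, h2]; ring
  · simp only [hk, decide_false]
    have hk0 : (k : Int) % 2 = 0 := by omega
    push_cast
    have h1 : ((k : Int) + 1 + 1) / 2 = ((k : Int) + 1) / 2 + 1 := by omega
    have h2 : ((k : Int) + 1) / 2 = (k : Int) / 2 := by omega
    rw [h1, h2]; ring

lemma pvGen_eq_map (start step1 step2 : Int) :
    ∀ (n k : Nat),
      pvGen step1 step2 (pvF start step1 step2 k) (decide (k % 2 = 1)) n =
        (List.range n).map (fun j => pvF start step1 step2 (k + 1 + j)) := by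
  intro n
  induction n with
  | zero => intro k; simp [pvGen]
  | succ n ih =>
      intro k
      have hx : (if decide (k % 2 = 1) then pvF start step1 step2 k + step2
                 else pvF start step1 step2 k + step1) = pvF start step1 step2 (k + 1) :=
        (pvF_succ start step1 step2 k).symm
      have hb : (!decide (k % 2 = 1)) = decide ((k + 1) % 2 = 1) := by
        by_cases hk : k % 2 = 1 <;> simp [hk] <;> omega
      simp only [pvGen]
      rw [hx, hb, ih (k + 1), List.range_succ_eq_map]
      simp only [List.map_cons, List.map_map]
      refine List.cons_eq_cons.mpr ⟨by norm_num, ?_⟩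
      apply List.map_congr_left
      intro j _
      simp only [Function.comp_apply]
      congr 1
      omega

-- ===== VERDICT (by name: the statement is the Claim_ definition above) =====
theorem fixed_length_alternate_steps_spec : Claim_equal_fixed_length_alternate_steps := by
  intro start length step1 step2 _
  unfold Spec_fixed_length_alternate_steps fixed_length_alternate_steps fixed_length_alternate_steps_alt
  have hA := pvLoopA_eq_gen length step1 step2 (length - 1).toNat start [start] false (by simp)
  rw [hA]
  have h0 : start = pvF start step1 step2 0 := by
    unfold pvF
    rw [PySem.Int.floordiv_eq_ediv_of_pos (by omega : (0:Int) < 2),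
        PySem.Int.floordiv_eq_ediv_of_pos (by omega : (0:Int) < 2)]
    norm_num
  congr 1
  rw [show pvGen step1 step2 start false (length - 1).toNat
        = pvGen step1 step2 (pvF start step1 step2 0) (decide (0 % 2 = 1)) (length - 1).toNat
      from by rw [← h0]; norm_num]
  rw [pvGen_eq_map, PySem.List.pyRange_one, List.map_map]
  apply List.map_congr_left
  intro j _
  simp only [Function.comp, pvF]
  have e1 : ((0 + 1 + j : Nat) : Int) = 1 + (j : Int) := by push_cast; ring
  rw [e1]
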